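-- pv_equiv track=rewrite | github.com/Jerry1772/Study | 프로그래머스/Python/연습문제/152995_인사고과.py | solution
-- ===== SOURCE A (Python) =====
-- from typing import List
--
-- def solution(scores:List[List[int]]):
--     wanho = scores[0]
--     scores.sort(key=lambda x: (-x[0], x[1]))
--
--     answer = 1
--     threshold = 0
--     wanho_score = sum(wanho)
--
--     for score in scores:
--         if wanho[0] < score[0] and wanho[1] < score[1]:
--             return -1
--         if threshold <= score[1]:
--             if wanho_score < sum(score):
--                 answer += 1
--             threshold = score[1]
--
--     return answer
-- ===== SOURCE B (Python) =====
-- from typing import List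
--
-- # NOTE: like A, this sorts `scores` in place (same key), so the caller-visible
-- # mutation is identical; the return value is computed by direct pairwise
-- # dominance checks instead of A's sorted scan with a running threshold.
-- def solution(scores: List[List[int]]):
--     wanho = scores[0]
--     scores.sort(key=lambda x: (-x[0], x[1]))  # kept only for A's in-place mutation
--     wanho_score = sum(wanho)
--     if any(wanho[0] < q[0] and wanho[1] < q[1] for q in scores):
--         return -1
--     return 1 + sum(1 for p in scores
--                    if wanho_score < sum(p)
--                    and not any(p[0] < q[0] and p[1] < q[1] for q in scores))
-- ===== Notes on version B (the rewrite author's own statement) =====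
-- stated objective: alternative
-- what changed: A's single sorted scan with a running threshold is replaced by direct pairwise Pareto-dominance checks (an inner scan per person); the in-place sort is kept only to preserve A's argument mutation.
-- intended difference: On inputs where the first person is undominated but some undominated person with a NEGATIVE second score has a sum above the first person's, A returns a count that wrongly omits every such person (its threshold starts at 0, not -infinity), while B counts them, which is the intended ranking count. — e.g. on solution([[0, 0], [3, -1]]): A returns 1, B returns 2
import Mathlib
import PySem

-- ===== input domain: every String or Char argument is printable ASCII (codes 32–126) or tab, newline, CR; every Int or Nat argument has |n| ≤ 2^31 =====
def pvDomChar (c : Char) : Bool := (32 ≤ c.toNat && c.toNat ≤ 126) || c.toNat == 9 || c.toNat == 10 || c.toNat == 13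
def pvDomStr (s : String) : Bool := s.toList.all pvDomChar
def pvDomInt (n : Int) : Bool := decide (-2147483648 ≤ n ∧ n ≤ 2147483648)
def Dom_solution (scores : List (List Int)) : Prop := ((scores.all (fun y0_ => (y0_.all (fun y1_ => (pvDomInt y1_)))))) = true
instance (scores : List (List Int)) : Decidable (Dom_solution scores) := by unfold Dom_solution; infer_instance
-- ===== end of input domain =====

-- Both programs sort `scores` in place; the equivalence proved here is about the return value
-- (the mutation is identical in A and B). B replaces A's threshold scan by pairwise dominance checks.

-- s[0] / s[1]; exact on Pre_ (every element has length ≥ 2)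
def pvF (s : List Int) : Int := PySem.List.pyGetD s 0 0
def pvS (s : List Int) : Int := PySem.List.pyGetD s 1 0

-- ===== PORT A =====
-- the for-loop of A, with early return -1 on a strict dominator of wanho
def pvLoopA (w0 w1 ws : Int) : List (List Int) → Int → Int → Int
  | [], answer, _ => answer
  | s :: rest, answer, threshold =>
    if w0 < pvF s ∧ w1 < pvS s then -1
    else if threshold ≤ pvS s then
      pvLoopA w0 w1 ws rest (if ws < s.sum then answer + 1 else answer) (pvS s)
    else
      pvLoopA w0 w1 ws rest answer threshold

def solution (scores : List (List Int)) : Int :=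
  let wanho := PySem.List.pyGetD scores 0 []   -- scores[0]; Pre_ excludes the empty list
  let t := PySem.List.sorted2 scores (fun x => -(pvF x)) (fun x => pvS x)
  pvLoopA (pvF wanho) (pvS wanho) wanho.sum t 1 0

-- ===== PORT B =====
def solution_alt (scores : List (List Int)) : Int :=
  let wanho := PySem.List.pyGetD scores 0 []
  let t := PySem.List.sorted2 scores (fun x => -(pvF x)) (fun x => pvS x)  -- the in-place sort
  let ws := wanho.sum
  if t.any (fun q => decide (pvF wanho < pvF q) && decide (pvS wanho < pvS q)) then -1
  else
    1 + (t.countP (fun p => decide (ws < p.sum) &&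
          !(t.any (fun q => decide (pvF p < pvF q) && decide (pvS p < pvS q)))) : Int)

-- ===== PRECONDITION & SPEC =====
-- Pre_ excludes exactly the inputs where the Python A raises IndexError: the empty list
-- (scores[0]) and rows with fewer than two entries (x[0]/x[1] in the key and the loop).
def Pre_solution (scores : List (List Int)) : Prop :=
  scores ≠ [] ∧ ∀ s ∈ scores, 2 ≤ s.length
instance (scores : List (List Int)) : Decidable (Pre_solution scores) := by
  unfold Pre_solution; infer_instance

def pvWitness_solution : List (List Int) := [[4, 5], [2, 1]]

-- On inputs where scores[0] is undominated but some undominated person with a negative second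
-- score has a sum above scores[0]'s, A's count wrongly omits every such person (its running
-- threshold starts at 0 instead of -infinity), while B counts them, the intended ranking count.
def D_solution (scores : List (List Int)) : Prop :=
  (∀ q ∈ scores, ¬(pvF scores.headI < pvF q ∧ pvS scores.headI < pvS q)) ∧
  (∃ p ∈ scores, pvS p < 0 ∧ scores.headI.sum < p.sum ∧
    ∀ q ∈ scores, ¬(pvF p < pvF q ∧ pvS p < pvS q))
instance (scores : List (List Int)) : Decidable (D_solution scores) := by
  unfold D_solution; infer_instance

def Spec_solution (scores : List (List Int)) (out : Int) : Prop :=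
  ¬ D_solution scores → out = solution_alt scores
instance (scores : List (List Int)) (out : Int) : Decidable (Spec_solution scores out) := by
  unfold Spec_solution; infer_instance

def pvDiffWitness_solution : List (List Int) := [[0, 0], [3, -1]]
def pvDiffWitnessOut_solution : Int × Int := (1, 2)

-- ===== CLAIM (what is proved, stated in full; the proofs are below) =====
def Claim_unchanged_solution : Prop := ∀ (scores : List (List Int)), Dom_solution scores → Pre_solution scores → Spec_solution scores (solution scores)
def Claim_changed_solution : Prop := Dom_solution (pvDiffWitness_solution) ∧ Pre_solution (pvDiffWitness_solution) ∧ D_solution (pvDiffWitness_solution) ∧ solution (pvDiffWitness_solution) = pvDiffWitnessOut_solution.1 ∧ solution_alt (pvDiffWitness_solution) = pvDiffWitnessOut_solution.2 ∧ pvDiffWitnessOut_solution.1 ≠ pvDiffWitnessOut_solution.2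
def Claim_exact_solution : Prop := ∀ (scores : List (List Int)), Dom_solution scores → Pre_solution scores → D_solution scores → solution scores ≠ solution_alt scores

-- ===== LEMMAS AND PROOFS =====

-- the comparison sorted2 uses, specialised to the key (-x[0], x[1])
def pvBef (a b : List Int) : Bool :=
  decide (-(pvF a) < -(pvF b)) || (!decide (-(pvF b) < -(pvF a)) && decide (pvS a < pvS b))

-- "a may come before b" in the sorted output
def pvR (a b : List Int) : Prop :=
  pvF b ≤ pvF a ∧ (pvF a = pvF b → pvS a ≤ pvS b)

theorem pvSorted2_eq (xs : List (List Int)) :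
    PySem.List.sorted2 xs (fun x => -(pvF x)) (fun x => pvS x) =
      xs.foldl (fun acc x => PySem.List.insertBy pvBef x acc) [] := by
  rfl

theorem pvBef_false_iff (a b : List Int) : pvBef a b = false ↔ pvR b a := by
  simp [pvBef, pvR]; omega

theorem pvInsertBy_pairwise (x : List Int) (ys : List (List Int))
    (h : ys.Pairwise pvR) : (PySem.List.insertBy pvBef x ys).Pairwise pvR := by
  induction ys with
  | nil =>
    simp [PySem.List.insertBy]
  | cons y ys ih =>
    rcases List.pairwise_cons.mp h with ⟨hy, hys⟩
    by_cases hb : pvBef x y = true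
    · simp only [PySem.List.insertBy, hb]
      constructor
      · intro z hz
        rcases List.mem_cons.mp hz with hz | hz
        · subst hz
          have := hb; simp [pvBef, pvR] at this ⊢; omega
        · have hyz := hy z hz
          have := hb
          simp [pvBef] at this
          simp [pvR] at hyz ⊢
          omega
      · exact h
    · have hb' : pvBef x y = false := by revert hb; cases pvBef x y <;> simp
      have hins : PySem.List.insertBy pvBef x (y :: ys) = y :: PySem.List.insertBy pvBef x ys := by
        simp [PySem.List.insertBy, hb']
      rw [hins]
      constructor
      · intro z hz
        rw [PySem.List.mem_insertBy] at hz
        rcases hz with hz | hz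
        · rw [hz]; exact (pvBef_false_iff x y).mp hb'
        · exact hy z hz
      · exact ih hys

theorem pvSorted2_pairwise (xs : List (List Int)) :
    (PySem.List.sorted2 xs (fun x => -(pvF x)) (fun x => pvS x)).Pairwise pvR := by
  rw [pvSorted2_eq]
  have : ∀ (l : List (List Int)) (acc : List (List Int)), acc.Pairwise pvR →
      (l.foldl (fun acc x => PySem.List.insertBy pvBef x acc) acc).Pairwise pvR := by
    intro l
    induction l with
    | nil => intro acc h; simpa using h
    | cons x l ih => intro acc h; exact ih _ (pvInsertBy_pairwise x acc h)
  exact this xs [] (by simp)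

-- A's loop returns -1 as soon as some element strictly dominates wanho
theorem pvLoopA_neg (w0 w1 ws : Int) (t : List (List Int)) :
    ∀ ans th, (∃ s ∈ t, w0 < pvF s ∧ w1 < pvS s) →
      pvLoopA w0 w1 ws t ans th = -1 := by
  induction t with
  | nil => intro ans th h; simp at h
  | cons s r ih =>
    intro ans th h
    by_cases hd : w0 < pvF s ∧ w1 < pvS s
    · simp [pvLoopA, hd]
    · have : ∃ x ∈ r, w0 < pvF x ∧ w1 < pvS x := by
        rcases h with ⟨x, hx, hxd⟩
        rcases List.mem_cons.mp hx with hx | hx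
        · exact absurd (hx ▸ hxd) hd
        · exact ⟨x, hx, hxd⟩
      by_cases hth : th ≤ pvS s <;> simp [pvLoopA, hd, hth, ih _ _ this]

-- the per-suffix predicate A's threshold scan counts
def pvPredA (ws th : Int) (t : List (List Int)) (p : List Int) : Bool :=
  decide (th ≤ pvS p) && decide (ws < p.sum) &&
    !(t.any (fun q => decide (pvF p < pvF q) && decide (pvS p < pvS q)))

-- A's loop counts, among a sorted suffix with no dominator of wanho, exactly the persons whose
-- second score reaches the running threshold, are undominated, and whose sum beats wanho's
theorem pvLoopA_count (w0 w1 ws : Int) (t : List (List Int)) :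
    t.Pairwise pvR → (∀ s ∈ t, ¬(w0 < pvF s ∧ w1 < pvS s)) →
    ∀ ans th, pvLoopA w0 w1 ws t ans th = ans + (t.countP (pvPredA ws th t) : Int) := by
  induction t with
  | nil => intro _ _ ans th; simp [pvLoopA]
  | cons s r ih =>
    intro hpw hnd ans th
    rcases List.pairwise_cons.mp hpw with ⟨hsr, hr⟩
    have hnds : ¬(w0 < pvF s ∧ w1 < pvS s) := hnd s (by simp)
    have hndr : ∀ x ∈ r, ¬(w0 < pvF x ∧ w1 < pvS x) := fun x hx => hnd x (by simp [hx])
    -- the head is never dominated inside s :: r (its first score is maximal)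
    have hheadnd : ((s :: r).any (fun q => decide (pvF s < pvF q) && decide (pvS s < pvS q))) = false := by
      simp only [List.any_eq_false]
      intro q hq
      rcases List.mem_cons.mp hq with hq | hq
      · subst hq; simp
      · have := hsr q hq; simp [pvR] at this; simp; omega
    -- for every tail element the predicate over s :: r at th equals the one over r at max th (pvS s)
    have hcongr : ∀ p ∈ r, pvPredA ws th (s :: r) p = pvPredA ws (max th (pvS s)) r p := by
      intro p hp
      have hsp := hsr p hp
      simp only [pvR] at hsp
      by_cases hc : pvS s ≤ pvS p
      · have h1 : ¬(pvF p < pvF s ∧ pvS p < pvS s) := by omega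
        simp only [pvPredA, List.any_cons]
        have : (decide (pvF p < pvF s) && decide (pvS p < pvS s)) = false := by
          simp; omega
        rw [this]
        have : max th (pvS s) ≤ pvS p ↔ th ≤ pvS p := by omega
        simp [this]
      · -- pvS p < pvS s: s strictly dominates p, and the new threshold exceeds pvS p
        have hdom : pvF p < pvF s ∧ pvS p < pvS s := by omega
        have h1 : pvPredA ws (max th (pvS s)) r p = false := by
          simp only [pvPredA]
          have hx : decide (max th (pvS s) ≤ pvS p) = false := by simp; omega
          rw [hx, Bool.false_and, Bool.false_and]
        have h2 : pvPredA ws th (s :: r) p = false := by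
          simp only [pvPredA, List.any_cons]
          have hx : (decide (pvF p < pvF s) && decide (pvS p < pvS s)) = true := by
            simp; omega
          rw [hx, Bool.true_or, Bool.not_true, Bool.and_false]
        rw [h1, h2]
    have hcount : (r.countP (pvPredA ws th (s :: r))) = r.countP (pvPredA ws (max th (pvS s)) r) :=
      List.countP_congr (fun x hx => by rw [hcongr x hx])
    by_cases hth : th ≤ pvS s
    · have hmax : max th (pvS s) = pvS s := by omega
      by_cases hsum : ws < s.sum
      · have hhead : pvPredA ws th (s :: r) s = true := by
          simp [pvPredA, hheadnd, hth, hsum]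
        simp only [pvLoopA, if_neg hnds, if_pos hth, if_pos hsum]
        rw [ih hr hndr (ans + 1) (pvS s), List.countP_cons, hcount, hmax, hhead]
        simp
        ring
      · have hhead : pvPredA ws th (s :: r) s = false := by
          simp [pvPredA, hsum]
        simp only [pvLoopA, if_neg hnds, if_pos hth, if_neg hsum]
        rw [ih hr hndr ans (pvS s), List.countP_cons, hcount, hmax, hhead]
        simp
    · have hmax : max th (pvS s) = th := by omega
      have hhead : pvPredA ws th (s :: r) s = false := by
        simp only [pvPredA]
        have : decide (th ≤ pvS s) = false := by simp; omega
        simp [this]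
      simp only [pvLoopA, if_neg hnds, if_neg hth]
      rw [ih hr hndr ans th, List.countP_cons, hcount, hmax, hhead]
      simp

-- counting a pointwise-weaker predicate with one strict witness is strictly larger
theorem pvCountP_lt (pA pB : List Int → Bool) (t : List (List Int))
    (hle : ∀ x ∈ t, pA x = true → pB x = true)
    (hw : ∃ x ∈ t, pB x = true ∧ pA x = false) :
    t.countP pA < t.countP pB := by
  induction t with
  | nil => simp at hw
  | cons s r ih =>
    rcases hw with ⟨x, hx, hBx, hAx⟩
    rcases List.mem_cons.mp hx with hx | hx
    · subst hx
      have h1 : r.countP pA ≤ r.countP pB :=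
        List.countP_mono_left (fun y hy => hle y (by simp [hy]))
      simp [hBx, hAx]
      omega
    · have h1 : r.countP pA < r.countP pB :=
        ih (fun y hy => hle y (by simp [hy])) ⟨x, hx, hBx, hAx⟩
      simp [List.countP_cons]
      have h2 : (if pA s = true then 1 else 0) ≤ (if pB s = true then 1 else 0) := by
        by_cases h : pA s = true
        · simp [h, hle s (by simp) h]
        · simp [h]
      omega

-- abbreviation used in the final assembly
def pvPredB (ws : Int) (t : List (List Int)) (p : List Int) : Bool :=
  decide (ws < p.sum) && !(t.any (fun q => decide (pvF p < pvF q) && decide (pvS p < pvS q)))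

theorem pvHead_eq (scores : List (List Int)) (h : scores ≠ []) :
    PySem.List.pyGetD scores 0 [] = scores.headI := by
  cases scores with
  | nil => simp at h
  | cons s r => simp [PySem.List.pyGetD, PySem.List.pyGet?, PySem.List.pyIdx?, List.headI]

-- ===== VERDICT (by name: the statement is the Claim_ definition above) =====
theorem solution_spec : Claim_unchanged_solution := by
  intro scores _hdom hpre hnd
  rcases hpre with ⟨hne, _⟩
  unfold solution solution_alt
  simp only []
  set w := PySem.List.pyGetD scores 0 [] with hw
  have hwh : w = scores.headI := pvHead_eq scores hne
  set t := PySem.List.sorted2 scores (fun x => -(pvF x)) (fun x => pvS x) with ht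
  have hperm : t.Perm scores := PySem.List.sorted2_perm _ _ _ _
  have hmem : ∀ x, x ∈ t ↔ x ∈ scores := fun x => hperm.mem_iff
  by_cases hdomw : ∃ q ∈ t, pvF w < pvF q ∧ pvS w < pvS q
  · rw [pvLoopA_neg _ _ _ _ _ _ hdomw]
    have : (t.any (fun q => decide (pvF w < pvF q) && decide (pvS w < pvS q))) = true := by
      simp only [List.any_eq_true]
      rcases hdomw with ⟨q, hq, h1, h2⟩
      exact ⟨q, hq, by simp [h1, h2]⟩
    simp [this]
  · have hany : (t.any (fun q => decide (pvF w < pvF q) && decide (pvS w < pvS q))) = false := by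
      simp only [List.any_eq_false]
      intro q hq
      simp only [Bool.and_eq_true, decide_eq_true_eq, not_and]
      intro h1 h2
      exact hdomw ⟨q, hq, h1, h2⟩
    have hnds : ∀ s ∈ t, ¬(pvF w < pvF s ∧ pvS w < pvS s) := by
      intro s hs hc; exact hdomw ⟨s, hs, hc⟩
    rw [pvLoopA_count _ _ _ _ (pvSorted2_pairwise scores) hnds 1 0]
    simp only [hany, Bool.false_eq_true, if_neg (by simp : ¬False)]
    -- under ¬D_, no counted person has a negative second score, so the two predicates agree
    have hpt : ∀ p ∈ t, pvPredA w.sum 0 t p = pvPredB w.sum t p := by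
      intro p hp
      by_cases hps : (0:Int) ≤ pvS p
      · simp only [pvPredA, pvPredB]
        have h0 : decide ((0:Int) ≤ pvS p) = true := by simpa using hps
        rw [h0, Bool.true_and]
      · have hnot : ¬(pvS p < 0 ∧ scores.headI.sum < p.sum ∧
            ∀ q ∈ scores, ¬(pvF p < pvF q ∧ pvS p < pvS q)) := by
          intro hc
          apply hnd
          refine ⟨?_, p, (hmem p).mp hp, hc⟩
          intro q hq hcq
          exact hdomw ⟨q, (hmem q).mpr hq, by rwa [hwh]⟩
        have hB : pvPredB w.sum t p = false := by
          simp only [pvPredB]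
          by_cases hsum : w.sum < p.sum
          · have hex : ∃ q ∈ t, pvF p < pvF q ∧ pvS p < pvS q := by
              by_contra hno
              simp only [not_exists, not_and] at hno
              refine hnot ⟨by omega, by rwa [← hwh], fun q hq hc2 => ?_⟩
              have h3 := hno q ((hmem q).mpr hq)
              omega
            rcases hex with ⟨q, hq, h1, h2⟩
            have hqa : (t.any (fun q => decide (pvF p < pvF q) && decide (pvS p < pvS q))) = true := by
              simp only [List.any_eq_true]
              exact ⟨q, hq, by simp [h1, h2]⟩
            rw [hqa]
            simp
          · have h0 : decide (w.sum < p.sum) = false := by simpa using hsum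
            rw [h0, Bool.false_and]
        have hA : pvPredA w.sum 0 t p = false := by
          simp only [pvPredA]
          have h0 : decide ((0:Int) ≤ pvS p) = false := by simpa using hps
          rw [h0, Bool.false_and, Bool.false_and]
        rw [hA, hB]
    have hc : t.countP (pvPredA w.sum 0 t) = t.countP (pvPredB w.sum t) :=
      List.countP_congr (fun x hx => by rw [hpt x hx])
    rw [hc]
    rfl

theorem solution_changed : Claim_changed_solution := by
  unfold Claim_changed_solution; decide

theorem solution_tight : Claim_exact_solution := by
  intro scores _hdom hpre hD
  rcases hpre with ⟨hne, _⟩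
  rcases hD with ⟨hndw, p, hp, hps, hpsum, hpnd⟩
  unfold solution solution_alt
  simp only []
  set w := PySem.List.pyGetD scores 0 [] with hw
  have hwh : w = scores.headI := pvHead_eq scores hne
  set t := PySem.List.sorted2 scores (fun x => -(pvF x)) (fun x => pvS x) with ht
  have hperm : t.Perm scores := PySem.List.sorted2_perm _ _ _ _
  have hmem : ∀ x, x ∈ t ↔ x ∈ scores := fun x => hperm.mem_iff
  have hnds : ∀ s ∈ t, ¬(pvF w < pvF s ∧ pvS w < pvS s) := by
    intro s hs hc
    exact hndw s ((hmem s).mp hs) (by rwa [hwh] at hc)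
  have hany : (t.any (fun q => decide (pvF w < pvF q) && decide (pvS w < pvS q))) = false := by
    simp only [List.any_eq_false]
    intro q hq
    simp only [Bool.and_eq_true, decide_eq_true_eq, not_and]
    intro h1 h2
    exact hnds q hq ⟨h1, h2⟩
  rw [pvLoopA_count _ _ _ _ (pvSorted2_pairwise scores) hnds 1 0]
  simp only [hany, Bool.false_eq_true, if_neg (by simp : ¬False)]
  have hlt : t.countP (pvPredA w.sum 0 t) < t.countP (pvPredB w.sum t) := by
    apply pvCountP_lt
    · intro x _ hx
      simp only [pvPredA, Bool.and_eq_true] at hx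
      simp only [pvPredB, Bool.and_eq_true]
      exact ⟨hx.1.2, hx.2⟩
    · refine ⟨p, (hmem p).mpr hp, ?_, ?_⟩
      · simp only [pvPredB, Bool.and_eq_true]
        constructor
        · simp; rw [hwh]; exact hpsum
        · simp only [Bool.not_eq_true', List.any_eq_false]
          intro q hq
          simp only [Bool.and_eq_true, decide_eq_true_eq, not_and]
          intro h1 h2
          exact hpnd q ((hmem q).mp hq) ⟨h1, h2⟩
      · simp only [pvPredA]
        have : decide ((0:Int) ≤ pvS p) = false := by simp; omega
        simp [this]
  show (1 + (t.countP (pvPredA w.sum 0 t) : Int)) ≠ 1 + (t.countP (pvPredB w.sum t) : Int)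
  omega
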